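-- pv_equiv track=rewrite | github.com/finlaymcnally/RecipeImporter | cookimport/parsing/sections.py | _looks_title_or_upper
-- ===== SOURCE A (Python) =====
-- def _looks_title_or_upper(text: str) -> bool:
--     words = [word for word in text.split() if word]
--     if not words:
--         return False
--
--     alpha_words = [word for word in words if any(char.isalpha() for char in word)]
--     if not alpha_words:
--         return False
--
--     if all(word.isupper() for word in alpha_words):
--         return True
--
--     title_like = 0
--     for word in alpha_words:
--         first_alpha = next((char for char in word if char.isalpha()), "")
--         if first_alpha and first_alpha.isupper():
--             title_like += 1
--     return title_like >= max(1, len(alpha_words) - 1)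
-- ===== SOURCE B (Python) =====
-- def _looks_title_or_upper(text: str) -> bool:
--     # Character-level state machine: no split(), no intermediate word lists.
--     alpha_words = 0
--     title_words = 0
--     in_alpha_word = False
--     for c in text:
--         if c.isspace():
--             in_alpha_word = False
--         elif c.isalpha() and not in_alpha_word:
--             in_alpha_word = True
--             alpha_words += 1
--             if c.isupper():
--                 title_words += 1
--     if alpha_words == 0:
--         return False
--     return title_words >= max(1, alpha_words - 1)
-- ===== Notes on version B (the rewrite author's own statement) =====
-- stated objective: alternative
-- what changed: Replaces A's word-list pipeline (split, two filtering comprehensions, an all-isupper scan and a per-word title-count loop) with a single character-level state machine over the raw string: an in_alpha_word flag plus two counters, counting a word's first alphabetic character the moment it is seen; no split and no intermediate lists, and the redundant all-uppercase branch disappears.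
import Mathlib
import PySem

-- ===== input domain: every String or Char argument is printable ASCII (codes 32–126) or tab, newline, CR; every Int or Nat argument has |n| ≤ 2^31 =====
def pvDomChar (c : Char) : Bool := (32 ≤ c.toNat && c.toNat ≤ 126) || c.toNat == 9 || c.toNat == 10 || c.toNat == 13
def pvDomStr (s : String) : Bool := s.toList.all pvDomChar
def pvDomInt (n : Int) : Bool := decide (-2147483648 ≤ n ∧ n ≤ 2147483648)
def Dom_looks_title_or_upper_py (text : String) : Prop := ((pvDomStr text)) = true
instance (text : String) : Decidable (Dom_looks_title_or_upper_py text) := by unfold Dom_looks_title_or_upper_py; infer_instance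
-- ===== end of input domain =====

-- B replaces A's word-list pipeline by a single character-level state machine (flag + two counters),
-- counting each word's first alphabetic character as it is seen; A's all-uppercase branch is redundant.
-- Objective: alternative (same O(n) cost, no split and no intermediate lists).

-- ===== PORT A =====
-- word.isupper() for a word of printable-ASCII chars (cased chars = A..Z, a..z): at least one
-- cased character and no lowercase one; exact on the stated ASCII domain.
def pvStrIsupper (w : List Char) : Bool :=
  w.any PySem.Chars.isalpha && w.all (fun c => !(PySem.Chars.islower c))

def looks_title_or_upper_py (text : String) : Bool :=
  let words := (PySem.Chars.split₀ text.toList).filter (fun w => !w.isEmpty)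
  if words.isEmpty then false
  else
    let alpha_words := words.filter (fun w => w.any PySem.Chars.isalpha)
    if alpha_words.isEmpty then false
    else if alpha_words.all pvStrIsupper then true
    else
      -- next((char for char in word if char.isalpha()), "") is List.find?; "" is falsy, so a
      -- word without an alpha char adds nothing
      let title_like : Nat := alpha_words.foldl (fun t w =>
        match w.find? PySem.Chars.isalpha with
        | some c => if PySem.Chars.isupper c then t + 1 else t
        | none => t) 0
      decide (((title_like : Int)) ≥ max 1 ((alpha_words.length : Int) - 1))

-- ===== PORT B =====
-- one step of Source B's loop; state = (alpha_words, title_words, in_alpha_word)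
def pvStepB (p : Nat × Nat × Bool) (c : Char) : Nat × Nat × Bool :=
  if PySem.Chars.isspace c then (p.1, p.2.1, false)
  else if PySem.Chars.isalpha c && !p.2.2 then
    (p.1 + 1, (if PySem.Chars.isupper c then p.2.1 + 1 else p.2.1), true)
  else p

def looks_title_or_upper_py_alt (text : String) : Bool :=
  let p := text.toList.foldl pvStepB (0, 0, false)
  if p.1 = 0 then false
  else decide (((p.2.1 : Int)) ≥ max 1 ((p.1 : Int) - 1))

-- ===== PRECONDITION & SPEC =====
def Spec_looks_title_or_upper_py (text : String) (out : Bool) : Prop := out = looks_title_or_upper_py_alt text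
instance (text : String) (out : Bool) : Decidable (Spec_looks_title_or_upper_py text out) := by unfold Spec_looks_title_or_upper_py; infer_instance

-- ===== CLAIM (what is proved, stated in full; the proofs are below) =====
def Claim_equal_looks_title_or_upper_py : Prop := ∀ (text : String), Dom_looks_title_or_upper_py text → Spec_looks_title_or_upper_py text (looks_title_or_upper_py text)

-- ===== LEMMAS AND PROOFS =====

-- word has an alpha character
def pvHasA (w : List Char) : Bool := w.any PySem.Chars.isalpha
-- word's first alpha character exists and is uppercase
def pvFirstUp (w : List Char) : Bool :=
  match w.find? PySem.Chars.isalpha with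
  | some c => PySem.Chars.isupper c
  | none => false
-- non-space predicate (word characters)
def pvW (c : Char) : Bool := !PySem.Chars.isspace c

theorem pvFirstUp_imp_hasA (w : List Char) (h : pvFirstUp w = true) : pvHasA w = true := by
  unfold pvFirstUp at h
  cases hf : w.find? PySem.Chars.isalpha with
  | none => simp [hf] at h
  | some c =>
    have hca := List.find?_some hf
    have hm := List.mem_of_find?_eq_some hf
    simp only [pvHasA, List.any_eq_true]
    exact ⟨c, hm, hca⟩

theorem pvHasA_imp_ne_nil (w : List Char) (h : pvHasA w = true) : w.isEmpty = false := by
  cases w with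
  | nil => simp [pvHasA] at h
  | cons a l => simp

-- one-step equations for split₀.go (definitional)
theorem pv_go_nil (cur : List Char) (acc : List (List Char)) :
    PySem.Chars.split₀.go [] cur acc
      = if cur.isEmpty then acc.reverse else (cur.reverse :: acc).reverse := rfl

theorem pv_go_cons (c : Char) (cs cur : List Char) (acc : List (List Char)) :
    PySem.Chars.split₀.go (c :: cs) cur acc
      = if PySem.Chars.isspace c then
          (if cur.isEmpty then PySem.Chars.split₀.go cs [] acc
           else PySem.Chars.split₀.go cs [] (cur.reverse :: acc))
        else PySem.Chars.split₀.go cs (c :: cur) acc := rfl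

-- split₀.go with a non-empty accumulator
theorem pv_go_acc (cs : List Char) (cur : List Char) (acc : List (List Char)) :
    PySem.Chars.split₀.go cs cur acc = acc.reverse ++ PySem.Chars.split₀.go cs cur [] := by
  induction cs generalizing cur acc with
  | nil =>
    by_cases h : cur.isEmpty = true <;> simp [pv_go_nil, h]
  | cons c cs ih =>
    by_cases hs : PySem.Chars.isspace c = true
    · by_cases h : cur.isEmpty = true
      · simp only [pv_go_cons, hs, h, if_true]
        rw [ih [] acc]
      · simp only [pv_go_cons, hs, h, if_true, Bool.false_eq_true, if_false]
        rw [ih [] (cur.reverse :: acc), ih [] [cur.reverse]]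
        simp
    · simp only [pv_go_cons, hs, Bool.false_eq_true, if_false]
      rw [ih (c :: cur) acc]

theorem pv_split0_cons_space (c : Char) (cs : List Char) (h : PySem.Chars.isspace c = true) :
    PySem.Chars.split₀ (c :: cs) = PySem.Chars.split₀ cs := by
  simp [PySem.Chars.split₀, pv_go_cons, h]

-- split₀.go on a non-empty current word
theorem pv_go_word (cs : List Char) (cur : List Char) (hcur : cur ≠ []) :
    PySem.Chars.split₀.go cs cur []
      = (cur.reverse ++ cs.takeWhile pvW) :: PySem.Chars.split₀ (cs.dropWhile pvW) := by
  induction cs generalizing cur with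
  | nil =>
    have h : cur.isEmpty = false := by simpa [List.isEmpty_iff] using hcur
    simp [pv_go_nil, h, PySem.Chars.split₀]
  | cons c cs ih =>
    by_cases hs : PySem.Chars.isspace c = true
    · have h : cur.isEmpty = false := by simpa [List.isEmpty_iff] using hcur
      have hW : pvW c = false := by simp [pvW, hs]
      simp only [pv_go_cons, hs, h, if_true, if_false, Bool.false_eq_true]
      rw [pv_go_acc]
      simp [List.takeWhile_cons, List.dropWhile_cons, hW, PySem.Chars.split₀, pv_go_cons, hs]
    · have hW : pvW c = true := by simp [pvW, hs]
      simp only [pv_go_cons, hs, Bool.false_eq_true, if_false]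
      rw [ih (c :: cur) (by simp)]
      simp [List.takeWhile_cons, List.dropWhile_cons, hW]

theorem pv_split0_cons_word (c : Char) (cs : List Char) (h : PySem.Chars.isspace c = false) :
    PySem.Chars.split₀ (c :: cs)
      = (c :: cs.takeWhile pvW) :: PySem.Chars.split₀ (cs.dropWhile pvW) := by
  simp only [PySem.Chars.split₀, pv_go_cons, h, Bool.false_eq_true, if_false]
  rw [pv_go_word cs [c] (by simp)]
  simp [PySem.Chars.split₀]

-- counting a word-splitting predicate across split₀, for predicates false on []
theorem pv_countP_split0 (q : List Char → Bool) (hq : q [] = false) (cs : List Char) :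
    (PySem.Chars.split₀ cs).countP q
      = (if q (cs.takeWhile pvW) then 1 else 0) + (PySem.Chars.split₀ (cs.dropWhile pvW)).countP q := by
  cases cs with
  | nil => simp [PySem.Chars.split₀, pv_go_nil, hq]
  | cons c cs =>
    by_cases hs : PySem.Chars.isspace c = true
    · have hW : pvW c = false := by simp [pvW, hs]
      simp [List.takeWhile_cons, List.dropWhile_cons, hW, hq, pv_split0_cons_space c cs hs]
    · have hW : pvW c = true := by simp [pvW, hs]
      rw [pv_split0_cons_word c cs (by simpa using hs)]
      simp [List.takeWhile_cons, List.dropWhile_cons, hW, List.countP_cons]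
      omega

-- the state machine's counters, related to split₀'s words
theorem pv_mach (cs : List Char) : ∀ (a t : Nat),
    (∃ b, cs.foldl pvStepB (a, t, false)
        = (a + (PySem.Chars.split₀ cs).countP pvHasA,
           t + (PySem.Chars.split₀ cs).countP pvFirstUp, b))
  ∧ (∃ b, cs.foldl pvStepB (a, t, true)
        = (a + (PySem.Chars.split₀ (cs.dropWhile pvW)).countP pvHasA,
           t + (PySem.Chars.split₀ (cs.dropWhile pvW)).countP pvFirstUp, b)) := by
  induction cs with
  | nil => intro a t; simp [PySem.Chars.split₀, pv_go_nil]
  | cons c cs ih =>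
    intro a t
    by_cases hs : PySem.Chars.isspace c = true
    · have hW : pvW c = false := by simp [pvW, hs]
      constructor
      · obtain ⟨b, hb⟩ := (ih a t).1
        exact ⟨b, by simp [List.foldl_cons, pvStepB, hs, hb, pv_split0_cons_space c cs hs]⟩
      · obtain ⟨b, hb⟩ := (ih a t).1
        exact ⟨b, by simp [List.foldl_cons, pvStepB, hs, hb, List.dropWhile_cons, hW,
          pv_split0_cons_space c cs hs]⟩
    · have hW : pvW c = true := by simp [pvW, hs]
      have hsplit := pv_split0_cons_word c cs (by simpa using hs)
      constructor
      · by_cases ha : PySem.Chars.isalpha c = true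
        · obtain ⟨b, hb⟩ := (ih (a + 1) (t + if PySem.Chars.isupper c then 1 else 0)).2
          refine ⟨b, ?_⟩
          have hHA : pvHasA (c :: cs.takeWhile pvW) = true := by
            simp [pvHasA, ha]
          have hFU : pvFirstUp (c :: cs.takeWhile pvW) = PySem.Chars.isupper c := by
            simp [pvFirstUp, List.find?_cons, ha]
          rw [List.foldl_cons]
          have hstep : pvStepB (a, t, false) c
              = (a + 1, (if PySem.Chars.isupper c then t + 1 else t), true) := by
            simp [pvStepB, hs, ha]
          rw [hstep]
          have : (if PySem.Chars.isupper c then t + 1 else t)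
              = t + (if PySem.Chars.isupper c then 1 else 0) := by split_ifs <;> omega
          rw [this, hb, hsplit]
          simp [List.countP_cons, hHA, hFU]
          constructor
          · omega
          · split_ifs <;> omega
        · obtain ⟨b, hb⟩ := (ih a t).1
          refine ⟨b, ?_⟩
          have hHA : pvHasA (c :: cs.takeWhile pvW) = pvHasA (cs.takeWhile pvW) := by
            simp [pvHasA, ha]
          have hFU : pvFirstUp (c :: cs.takeWhile pvW) = pvFirstUp (cs.takeWhile pvW) := by
            simp [pvFirstUp, List.find?_cons, ha]
          have hstep : pvStepB (a, t, false) c = (a, t, false) := by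
            simp [pvStepB, hs, ha]
          rw [List.foldl_cons, hstep, hb, hsplit]
          rw [pv_countP_split0 pvHasA (by simp [pvHasA]) cs,
              pv_countP_split0 pvFirstUp (by simp [pvFirstUp]) cs]
          simp [List.countP_cons, hHA, hFU]
          constructor <;> · split_ifs <;> omega
      · obtain ⟨b, hb⟩ := (ih a t).2
        refine ⟨b, ?_⟩
        have hstep : pvStepB (a, t, true) c = (a, t, true) := by
          simp [pvStepB, hs]
        rw [List.foldl_cons, hstep, hb]
        simp [List.dropWhile_cons, hW]

-- A's title loop counts pvFirstUp
theorem pv_fold_A (ws : List (List Char)) (t : Nat) :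
    ws.foldl (fun t w =>
      match w.find? PySem.Chars.isalpha with
      | some c => if PySem.Chars.isupper c then t + 1 else t
      | none => t) t
    = t + ws.countP pvFirstUp := by
  induction ws generalizing t with
  | nil => simp
  | cons w ws ih =>
    simp only [List.foldl_cons, List.countP_cons]
    cases hf : w.find? PySem.Chars.isalpha with
    | none =>
      have hU : pvFirstUp w = false := by simp [pvFirstUp, hf]
      simp only [ih, hU, Bool.false_eq_true, if_false, Nat.add_zero]
    | some c =>
      have hU : pvFirstUp w = PySem.Chars.isupper c := by simp [pvFirstUp, hf]
      by_cases hu : PySem.Chars.isupper c = true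
      · simp only [hu, if_true, ih, hU]
        ring
      · simp only [Bool.not_eq_true] at hu
        simp only [hu, Bool.false_eq_true, if_false, ih, hU, Nat.add_zero]

-- an all-uppercase word with an alpha char has an uppercase first alpha char
theorem pv_isupper_firstUp (w : List Char) (hA : pvHasA w = true) (hU : pvStrIsupper w = true) :
    pvFirstUp w = true := by
  cases hf : w.find? PySem.Chars.isalpha with
  | none =>
    exfalso
    simp only [pvHasA, List.any_eq_true] at hA
    obtain ⟨c, hc, hca⟩ := hA
    have := List.find?_eq_none.mp hf c hc
    simp [hca] at this
  | some c =>
    have hca := List.find?_some hf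
    have hm := List.mem_of_find?_eq_some hf
    simp only [pvStrIsupper, Bool.and_eq_true, List.all_eq_true] at hU
    have hnl := hU.2 c hm
    simp only [Bool.not_eq_true'] at hnl
    have hup : PySem.Chars.isupper c = true := by
      simp [PySem.Chars.isalpha, hnl] at hca
      exact hca
    simp [pvFirstUp, hf, hup]

-- ===== VERDICT (by name: the statement is the Claim_ definition above) =====
theorem looks_title_or_upper_py_spec : Claim_equal_looks_title_or_upper_py := by
  intro text _
  unfold Spec_looks_title_or_upper_py looks_title_or_upper_py looks_title_or_upper_py_alt
  obtain ⟨b, hB⟩ := (pv_mach text.toList 0 0).1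
  rw [hB]
  simp only [Nat.zero_add]
  generalize PySem.Chars.split₀ text.toList = ws
  simp only [pv_fold_A]
  have hfilter : (ws.filter (fun w => !w.isEmpty)).filter (fun w => w.any PySem.Chars.isalpha)
      = ws.filter pvHasA := by
    rw [List.filter_filter]
    apply List.filter_congr
    intro w _
    by_cases h : w.any PySem.Chars.isalpha = true
    · have hne := pvHasA_imp_ne_nil w (by simpa [pvHasA] using h)
      simp [pvHasA, h, hne]
    · simp only [Bool.not_eq_true] at h
      simp [pvHasA, h]
  rw [hfilter]
  have hcountA : (ws.filter pvHasA).length = ws.countP pvHasA :=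
    List.countP_eq_length_filter.symm
  have hcountU : (ws.filter pvHasA).countP pvFirstUp = ws.countP pvFirstUp := by
    rw [List.countP_filter]
    apply List.countP_congr
    intro w _
    constructor
    · intro h; simp only [Bool.and_eq_true] at h; exact h.1
    · intro h; simp only [Bool.and_eq_true]; exact ⟨h, pvFirstUp_imp_hasA w h⟩
  by_cases h0 : ws.countP pvHasA = 0
  · have hnil : ws.filter pvHasA = [] := by
      have h := hcountA; rw [h0] at h
      exact List.length_eq_zero_iff.mp h
    rw [hnil]
    simp [h0]
  · have hAWne : ws.filter pvHasA ≠ [] := by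
      intro h; rw [h] at hcountA; simp at hcountA; exact h0 hcountA.symm
    have hwordsne : ws.filter (fun w => !w.isEmpty) ≠ [] := by
      obtain ⟨w, hw⟩ := List.exists_mem_of_ne_nil _ hAWne
      have hmem := List.mem_of_mem_filter hw
      have hA : pvHasA w = true := List.of_mem_filter hw
      intro hcon
      have hwin : w ∈ ws.filter (fun w => !w.isEmpty) := by
        rw [List.mem_filter]
        exact ⟨hmem, by simp [pvHasA_imp_ne_nil w hA]⟩
      rw [hcon] at hwin; exact absurd hwin (List.not_mem_nil)
    rw [if_neg (by simpa [List.isEmpty_iff] using hwordsne),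
        if_neg (by simpa [List.isEmpty_iff] using hAWne),
        if_neg h0]
    simp only [Nat.zero_add]
    rw [hcountA, hcountU]
    by_cases hall : (ws.filter pvHasA).all pvStrIsupper = true
    · rw [if_pos hall]
      have heq : ws.countP pvFirstUp = ws.countP pvHasA := by
        rw [← hcountU, ← hcountA]
        apply List.countP_eq_length.mpr
        intro w hw
        simp only [List.all_eq_true] at hall
        exact pv_isupper_firstUp w (List.of_mem_filter hw) (hall w hw)
      rw [heq]
      symm
      rw [decide_eq_true_eq]
      have h1 : (1 : Int) ≤ (ws.countP pvHasA : Int) := by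
        exact_mod_cast Nat.pos_of_ne_zero h0
      omega
    · rw [if_neg hall]
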